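-- pv_equiv track=rewrite | github.com/suzzini/programmers_codingtest | 스택,큐-기능선발.py | solution
-- ===== SOURCE A (Python) =====
-- import math
--
-- def solution(progress, speeds):
--     r_days = []
--     days = []
--
--     # 남은 작업일 수 구하기
--     for i, j in list(zip(progress, speeds)):
--         r_days.append(math.ceil((100 - i) / j))
--
--     temp = r_days[0]
--     func_count = 1
--
--     for i in range(1, len(r_days)):
--         if (temp < r_days[i]):
--             temp = r_days[i]
--             days.append(func_count)
--             func_count = 1
--         else:
--             func_count += 1
--
--     days.append(func_count)
--
--     return days
-- ===== SOURCE B (Python) =====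
-- import math
--
-- def solution(progress, speeds):
--     # recursive group-splitting: find the first later task that outlasts the
--     # current group head, emit that group, recurse on the remainder
--     r = [math.ceil((100 - p) / s) for p, s in zip(progress, speeds)]
--
--     def groups(lst):
--         head, tail = lst[0], lst[1:]
--         for k, v in enumerate(tail):
--             if v > head:
--                 return [k + 1] + groups(tail[k:])
--         return [len(tail) + 1]
--
--     return groups(r)
-- ===== Notes on version B (the rewrite author's own statement) =====
-- stated objective: alternative
-- what changed: B replaces A's single left-to-right fold carrying (running max, counter) state by a recursive divide: it searches for the first later task that strictly outlasts the current group head, emits that prefix as one group, and recurses on the remaining suffix.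
import Mathlib
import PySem

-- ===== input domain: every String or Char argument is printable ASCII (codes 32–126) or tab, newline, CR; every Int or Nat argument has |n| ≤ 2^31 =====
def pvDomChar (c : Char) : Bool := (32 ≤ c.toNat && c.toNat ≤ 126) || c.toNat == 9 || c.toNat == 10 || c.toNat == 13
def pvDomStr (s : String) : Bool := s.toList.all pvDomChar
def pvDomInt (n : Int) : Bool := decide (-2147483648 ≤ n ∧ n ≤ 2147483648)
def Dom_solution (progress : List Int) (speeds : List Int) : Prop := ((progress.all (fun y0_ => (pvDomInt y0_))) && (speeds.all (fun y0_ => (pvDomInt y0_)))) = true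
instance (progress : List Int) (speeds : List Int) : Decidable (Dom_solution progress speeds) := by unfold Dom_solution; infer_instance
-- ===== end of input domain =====

-- B groups the days recursively (find the first later task outlasting the current
-- group head, emit that group, recurse on the rest) instead of A's single fold
-- with a running counter (objective: alternative decomposition, same O(n) cost).

-- ===== PORT A =====
-- math.ceil((100 - i) / j): exact integer ceiling division; in Python
-- ceil(a/b) = -((-a) // b), exact for |ints| ≤ 2^31
def pvCeil (a : Int) (b : Int) : Int := -(PySem.Int.floordiv (-a) b)

def solution (progress : List Int) (speeds : List Int) : List Int :=
  -- for i, j in zip(progress, speeds): r_days.append(math.ceil((100-i)/j))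
  let r_days : List Int :=
    (progress.zip speeds).foldl (fun acc ij => acc ++ [pvCeil (100 - ij.1) ij.2]) []
  -- temp = r_days[0]; func_count = 1; for i in range(1, len(r_days)): ...
  let fin :=
    (PySem.List.pyRange 1 (PySem.List.len r_days) 1).foldl
      (fun (st : Int × List Int × Int) i =>
        if st.1 < PySem.List.pyGetD r_days i 0 then
          (PySem.List.pyGetD r_days i 0, st.2.1 ++ [st.2.2], 1)
        else (st.1, st.2.1, st.2.2 + 1))
      (PySem.List.pyGetD r_days 0 0, [], 1)
  fin.2.1 ++ [fin.2.2]

-- ===== PORT B =====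
-- groups(lst): head, tail = lst[0], lst[1:]; the for/enumerate/early-return search
-- for the first tail element > head is List.findIdx?; then [k+1] + groups(tail[k:])
def pvGroups : List Int → List Int
  | [] => []        -- unreachable under Pre_ (Python raises IndexError on lst[0])
  | head :: tail =>
    match tail.findIdx? (fun v => decide (head < v)) with
    | none => [(tail.length : Int) + 1]
    | some k => ((k : Int) + 1) :: pvGroups (tail.drop k)
termination_by lst => lst.length
decreasing_by simp [List.length_drop]

def solution_alt (progress : List Int) (speeds : List Int) : List Int :=
  let r : List Int := (progress.zip speeds).map (fun ij => pvCeil (100 - ij.1) ij.2)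
  pvGroups r

-- ===== PRECONDITION & SPEC =====
-- Pre_ excludes exactly the inputs where A raises: an empty zip (IndexError on
-- r_days[0]) and a zero speed among the zipped pairs (ZeroDivisionError).
def Pre_solution (progress : List Int) (speeds : List Int) : Prop :=
  progress ≠ [] ∧ speeds ≠ [] ∧ ∀ p ∈ progress.zip speeds, p.2 ≠ 0
instance (progress : List Int) (speeds : List Int) : Decidable (Pre_solution progress speeds) := by unfold Pre_solution; infer_instance

def pvWitness_solution : List Int × List Int := ([93, 30, 55], [1, 30, 5])

def Spec_solution (progress : List Int) (speeds : List Int) (out : List Int) : Prop := out = solution_alt progress speeds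
instance (progress : List Int) (speeds : List Int) (out : List Int) : Decidable (Spec_solution progress speeds out) := by unfold Spec_solution; infer_instance

-- ===== CLAIM (what is proved, stated in full; the proofs are below) =====
def Claim_equal_solution : Prop := ∀ (progress : List Int) (speeds : List Int), Dom_solution progress speeds → Pre_solution progress speeds → Spec_solution progress speeds (solution progress speeds)

-- ===== LEMMAS AND PROOFS =====

-- A's loop body as a step function on state (temp, days, func_count)
def pvStepA (st : Int × List Int × Int) (x : Int) : Int × List Int × Int :=
  if st.1 < x then (x, st.2.1 ++ [st.2.2], 1) else (st.1, st.2.1, st.2.2 + 1)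

-- A's loop, with the trailing days.append(func_count), as structural recursion
def pvRunA (temp : Int) (days : List Int) (fc : Int) : List Int → List Int
  | [] => days ++ [fc]
  | x :: xs => if temp < x then pvRunA x (days ++ [fc]) 1 xs else pvRunA temp days (fc + 1) xs

theorem pvFold_eq_runA (tail : List Int) : ∀ (temp : Int) (days : List Int) (fc : Int),
    (tail.foldl pvStepA (temp, days, fc)).2.1 ++ [(tail.foldl pvStepA (temp, days, fc)).2.2]
      = pvRunA temp days fc tail := by
  induction tail with
  | nil => intro temp days fc; simp [pvRunA]
  | cons x xs ih =>
    intro temp days fc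
    simp only [List.foldl_cons, pvStepA, pvRunA]
    by_cases h : temp < x
    · rw [if_pos h, if_pos h]; exact ih x (days ++ [fc]) 1
    · rw [if_neg h, if_neg h]; exact ih temp days (fc + 1)

theorem pvRunA_eq_groups_aux (n : Nat) : ∀ (tail : List Int), tail.length ≤ n →
    ∀ (head : Int) (days : List Int),
    pvRunA head days 1 tail = days ++ pvGroups (head :: tail) := by
  induction n with
  | zero =>
    intro tail htl head days
    have : tail = [] := List.eq_nil_of_length_eq_zero (Nat.le_zero.mp htl)
    subst this
    simp [pvRunA, pvGroups, List.findIdx?_nil]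
  | succ n ih =>
    intro tail htl head days
    -- key: pvRunA head days fc t, while elements stay ≤ head, only grows fc
    have step : ∀ (t : List Int) (fc : Int),
        pvRunA head days fc t =
          match t.findIdx? (fun v => decide (head < v)) with
          | none => days ++ [fc + (t.length : Int)]
          | some k => pvRunA (t.getD k 0) (days ++ [fc + (k : Int)]) 1 (t.drop (k + 1)) := by
      intro t
      induction t with
      | nil => intro fc; simp [pvRunA, List.findIdx?_nil]
      | cons x xs ihx =>
        intro fc
        simp only [pvRunA, List.findIdx?_cons]
        by_cases h : head < x
        · simp [h]
        · have h' : (decide (head < x)) = false := by simp [h]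
          rw [if_neg h, ihx (fc + 1)]
          simp only [h']
          cases hfi : xs.findIdx? (fun v => decide (head < v)) with
          | none => simp; ring
          | some k =>
            simp only [Option.map_some]
            have : (fc + 1 + (k : Int)) = fc + ((k + 1 : Nat) : Int) := by push_cast; ring
            simp [List.getD, this]
    rw [step tail 1]
    cases hfi : tail.findIdx? (fun v => decide (head < v)) with
    | none =>
      unfold pvGroups
      simp only [hfi]
      simp
      ring
    | some k =>
      have hk : k < tail.length := by
        have := List.findIdx?_eq_some_iff_findIdx_eq.mp hfi; omega
      have hdrop : tail.drop k = tail.getD k 0 :: tail.drop (k + 1) := by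
        rw [List.getD_eq_getElem _ _ hk]
        exact (List.drop_eq_getElem_cons hk).trans rfl
      simp only []
      rw [ih (tail.drop (k + 1)) (by simp; omega) (tail.getD k 0) (days ++ [1 + (k : Int)])]
      conv_rhs => rw [pvGroups]
      simp only [hfi, hdrop]
      simp
      ring

theorem solution_eq (progress speeds : List Int)
    (hz : progress.zip speeds ≠ []) :
    solution progress speeds = solution_alt progress speeds := by
  simp only [solution, solution_alt, PySem.List.foldl_append_singleton_eq_map,
    List.nil_append, PySem.List.len_eq]
  obtain ⟨r0, rest, hrd⟩ : ∃ r0 rest,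
      (progress.zip speeds).map (fun ij => pvCeil (100 - ij.1) ij.2) = r0 :: rest := by
    cases h : (progress.zip speeds).map (fun ij => pvCeil (100 - ij.1) ij.2) with
    | nil => exact absurd (by simpa using h) hz
    | cons a t => exact ⟨a, t, rfl⟩
  rw [hrd]
  have hA : (fun (st : Int × List Int × Int) i =>
      if st.1 < PySem.List.pyGetD (r0 :: rest) i 0 then
        (PySem.List.pyGetD (r0 :: rest) i 0, st.2.1 ++ [st.2.2], 1)
      else (st.1, st.2.1, st.2.2 + 1)) =
      (fun acc j => pvStepA acc (PySem.List.pyGetD (r0 :: rest) j 0)) := rfl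
  rw [hA, PySem.List.foldl_pyRange_pyGetD' (r0 :: rest) 0 pvStepA _ (by norm_num : (0:Int) ≤ 1)]
  simp only [PySem.List.pyGetD_zero_cons, Int.toNat_one, List.drop_one, List.tail_cons]
  rw [pvFold_eq_runA rest r0 [] 1,
      pvRunA_eq_groups_aux rest.length rest le_rfl r0 []]
  simp

-- ===== VERDICT (by name: the statement is the Claim_ definition above) =====
theorem solution_spec : Claim_equal_solution := by
  intro progress speeds _ hpre
  unfold Spec_solution
  apply solution_eq
  rcases hpre with ⟨h1, h2, _⟩
  simp [List.zip_eq_nil_iff, h1, h2]
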